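-- pv_equiv track=rewrite | github.com/sh0416/glso0215-lab | 2444_test.py | generate_star_pyramid
-- ===== SOURCE A (Python) =====
-- def generate_star_pyramid(count):
--   result = []
--   for i in range(1, count * 2):
--     if i < count + 1:
--       blink = " " * (count - i)
--       star = "*" * (2 * i - 1)
--       result.append(blink + star)
--     else:
--       blink = " " * (i - count)
--       star = "*" * (2 * count - 1 - 2 * (i - count))
--       result.append(blink + star)
--   return "\n".join(result)
-- ===== SOURCE B (Python) =====
-- def generate_star_pyramid(count):
--   top = [" " * (count - i) + "*" * (2 * i - 1) for i in range(1, count + 1)]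
--   return "\n".join(top + top[:-1][::-1])
-- ===== Notes on version B (the rewrite author's own statement) =====
-- stated objective: simpler
-- what changed: B builds only the top half of the diamond (rows 1..count) and obtains the bottom half as the reversed top excluding the middle row, replacing A's branching loop over 1..2*count-1 with symmetry.
import Mathlib
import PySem

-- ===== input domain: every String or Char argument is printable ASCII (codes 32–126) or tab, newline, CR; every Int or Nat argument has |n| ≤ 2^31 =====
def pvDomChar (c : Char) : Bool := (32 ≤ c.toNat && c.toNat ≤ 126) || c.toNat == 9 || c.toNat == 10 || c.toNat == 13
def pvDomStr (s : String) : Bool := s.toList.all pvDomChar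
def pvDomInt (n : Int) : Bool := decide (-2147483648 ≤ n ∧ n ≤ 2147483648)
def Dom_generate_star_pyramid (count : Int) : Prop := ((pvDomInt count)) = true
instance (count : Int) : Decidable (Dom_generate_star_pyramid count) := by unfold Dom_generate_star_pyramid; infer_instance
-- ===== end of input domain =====

-- B builds only the top half of the diamond and mirrors it (without the middle row) for the
-- bottom half, instead of A's branching loop over all 2*count-1 rows: simpler decomposition.

-- ===== PORT A =====
-- '" " * n' / '"*" * n' is ported by hand as String.ofList (List.replicate n.toNat c):
-- exact, since Python's str*n is empty for n ≤ 0 and Int.toNat clamps negatives to 0.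
def generate_star_pyramid (count : Int) : String :=
  let result : List String :=
    (PySem.List.pyRange 1 (count * 2) 1).foldl (fun acc i =>
      if i < count + 1 then
        acc ++ [String.ofList (List.replicate (count - i).toNat ' ') ++
                String.ofList (List.replicate (2 * i - 1).toNat '*')]
      else
        acc ++ [String.ofList (List.replicate (i - count).toNat ' ') ++
                String.ofList (List.replicate (2 * count - 1 - 2 * (i - count)).toNat '*')]) []
  PySem.Str.join "\n" result

-- ===== PORT B =====
def generate_star_pyramid_alt (count : Int) : String :=
  let top : List String :=
    (PySem.List.pyRange 1 (count + 1) 1).map (fun i =>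
      String.ofList (List.replicate (count - i).toNat ' ') ++
      String.ofList (List.replicate (2 * i - 1).toNat '*'))
  -- top[:-1][::-1]
  PySem.Str.join "\n" (top ++ (PySem.List.slice top none (some (-1))).reverse)

-- ===== PRECONDITION & SPEC =====
def Spec_generate_star_pyramid (count : Int) (out : String) : Prop := out = generate_star_pyramid_alt count
instance (count : Int) (out : String) : Decidable (Spec_generate_star_pyramid count out) := by unfold Spec_generate_star_pyramid; infer_instance

-- ===== CLAIM (what is proved, stated in full; the proofs are below) =====
def Claim_equal_generate_star_pyramid : Prop := ∀ (count : Int), Dom_generate_star_pyramid count → Spec_generate_star_pyramid count (generate_star_pyramid count)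

-- ===== LEMMAS AND PROOFS =====

-- a fold that appends one element per step (chosen by a test) is a map
theorem pv_foldl_append_ite {α β : Type} (P : α → Prop) [DecidablePred P]
    (f g : α → β) (l : List α) (acc : List β) :
    l.foldl (fun acc i => if P i then acc ++ [f i] else acc ++ [g i]) acc
      = acc ++ l.map (fun i => if P i then f i else g i) := by
  induction l generalizing acc with
  | nil => simp
  | cons x xs ih => by_cases h : P x <;> simp [List.foldl, h, ih]

theorem pv_main (count : Int) :
    generate_star_pyramid count = generate_star_pyramid_alt count := by
  unfold generate_star_pyramid generate_star_pyramid_alt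
  by_cases hc : count ≤ 0
  · rw [PySem.List.pyRange_one_eq_nil (by omega : count * 2 ≤ 1),
        PySem.List.pyRange_one_eq_nil (by omega : count + 1 ≤ 1)]
    simp [PySem.List.slice_to_neg_one]
  · replace hc : 1 ≤ count := by omega
    simp only [pv_foldl_append_ite, PySem.List.slice_to_neg_one, List.nil_append]
    congr 1
    rw [PySem.List.pyRange_one_append 1 (count + 1) (count * 2) (by omega) (by omega),
        List.map_append]
    congr 1
    · exact List.map_congr_left fun i hi => by
        rw [PySem.List.mem_pyRange_one] at hi
        rw [if_pos hi.2]
    · rw [List.map_congr_left (l := PySem.List.pyRange (count + 1) (count * 2) 1)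
            (f := fun i => if i < count + 1 then
                String.ofList (List.replicate (count - i).toNat ' ') ++
                  String.ofList (List.replicate (2 * i - 1).toNat '*')
              else
                String.ofList (List.replicate (i - count).toNat ' ') ++
                  String.ofList (List.replicate (2 * count - 1 - 2 * (i - count)).toNat '*'))
            (g := fun i =>
                String.ofList (List.replicate (i - count).toNat ' ') ++
                  String.ofList (List.replicate (2 * count - 1 - 2 * (i - count)).toNat '*'))
            (fun i hi => by
              rw [PySem.List.mem_pyRange_one] at hi
              simp only [if_neg (show ¬ i < count + 1 by omega)])]
      rw [PySem.List.pyRange_one_succ_right (by omega : (1:Int) ≤ count)]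
      simp only [List.map_append, List.map_cons, List.map_nil]
      rw [List.dropLast_concat]
      rw [← List.map_reverse]
      rw [show PySem.List.pyRange 1 count 1
            = PySem.List.pyRange (0 + 1) ((count - 1) + 1) 1 from by norm_num,
          ← PySem.List.pyRange_neg_one_eq_reverse,
          PySem.List.pyRange_neg_one, PySem.List.pyRange_one, List.map_map, List.map_map]
      rw [show (count * 2 - (count + 1)).toNat = (count - 1 - 0).toNat from by omega]
      congr 1
      funext k
      simp only [Function.comp]
      rw [show (count + 1 + (k : Int) - count).toNat = (count - (count - 1 - 0 - k)).toNat
            from by omega,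
          show (2 * count - 1 - 2 * (count + 1 + (k : Int) - count)).toNat
            = (2 * (count - 1 - 0 - k) - 1).toNat from by omega]
      norm_num

-- ===== VERDICT (by name: the statement is the Claim_ definition above) =====
theorem generate_star_pyramid_spec : Claim_equal_generate_star_pyramid := by
  intro count _
  exact pv_main count
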